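-- pv_equiv track=rewrite | github.com/mvassos/nlp-question-answering-system | qa.py | get_sentence_index
-- ===== SOURCE A (Python) =====
-- def get_sentence_index(sentences, target):
--     i = 0
--     for sent in sentences:
--         temp = (" ".join(t[0] for t in sent))
--         if temp == target:
--             return i
--         i += 1
--
--
--     return None
-- ===== SOURCE B (Python) =====
-- def get_sentence_index(sentences, target):
--     table = {}
--     for i, sent in enumerate(sentences):
--         table.setdefault(" ".join(t[0] for t in sent), i)
--     return table.get(target)
-- ===== Notes on version B (the rewrite author's own statement) =====
-- stated objective: alternative
-- what changed: Replaces the manual-counter scan with early return by one table-building pass (dict keyed by the joined sentence, setdefault keeps the first index) followed by a single lookup with .get, which yields None on a miss.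
import Mathlib
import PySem

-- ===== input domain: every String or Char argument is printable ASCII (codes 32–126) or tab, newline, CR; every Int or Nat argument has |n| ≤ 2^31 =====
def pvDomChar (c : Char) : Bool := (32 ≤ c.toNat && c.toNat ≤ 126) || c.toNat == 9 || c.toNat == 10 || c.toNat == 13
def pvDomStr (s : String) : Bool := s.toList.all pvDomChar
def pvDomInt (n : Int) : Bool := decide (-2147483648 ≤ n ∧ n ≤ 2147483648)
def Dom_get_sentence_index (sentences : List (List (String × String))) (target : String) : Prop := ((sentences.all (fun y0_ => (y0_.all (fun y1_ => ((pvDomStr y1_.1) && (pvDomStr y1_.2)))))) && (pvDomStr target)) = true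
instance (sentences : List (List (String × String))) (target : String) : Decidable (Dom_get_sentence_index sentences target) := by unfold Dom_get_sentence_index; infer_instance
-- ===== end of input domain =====

-- ===== PORT A =====
-- One honest line: B builds a first-wins lookup table once and does a single dict lookup, instead of A's indexed scan with early return; same cost, different shape.
def pvJoinTokens (sent : List (String × String)) : String :=
  PySem.Str.join " " (sent.map (fun t => t.1))

def get_sentence_index_loop (sentences : List (List (String × String))) (target : String) (i : Int) : Option Int :=
  match sentences with
  | [] => none
  | sent :: rest =>
    let temp := pvJoinTokens sent
    if temp = target then some i else get_sentence_index_loop rest target (i + 1)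

def get_sentence_index (sentences : List (List (String × String))) (target : String) : Option Int :=
  get_sentence_index_loop sentences target 0

-- ===== PORT B =====
def get_sentence_index_alt (sentences : List (List (String × String))) (target : String) : Option Int :=
  let table := (PySem.List.enumerate sentences).foldl
    (fun d (p : Int × List (String × String)) => d.setdefault (pvJoinTokens p.2) p.1)
    PySem.Dict.empty
  table.get? target

-- ===== PRECONDITION & SPEC =====
def Spec_get_sentence_index (sentences : List (List (String × String))) (target : String) (out : Option Int) : Prop := out = get_sentence_index_alt sentences target
instance (sentences : List (List (String × String))) (target : String) (out : Option Int) : Decidable (Spec_get_sentence_index sentences target out) := by unfold Spec_get_sentence_index; infer_instance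

-- ===== CLAIM (what is proved, stated in full; the proofs are below) =====
def Claim_equal_get_sentence_index : Prop := ∀ (sentences : List (List (String × String))) (target : String), Dom_get_sentence_index sentences target → Spec_get_sentence_index sentences target (get_sentence_index sentences target)

-- ===== LEMMAS AND PROOFS =====

lemma fold_setdefault_get? (ps : List (Int × List (String × String))) (d : PySem.Dict String Int) (target : String) :
    (ps.foldl (fun d p => d.setdefault (pvJoinTokens p.2) p.1) d).get? target
      = ((d.get? target).or (ps.foldr (fun p acc => if pvJoinTokens p.2 = target then some p.1 else acc) none)) := by
  induction ps generalizing d with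
  | nil => simp
  | cons p ps ih =>
    simp only [List.foldl_cons, List.foldr_cons, ih]
    by_cases h : pvJoinTokens p.2 = target
    · subst h
      rcases hd : d.get? (pvJoinTokens p.2) with _ | v
      · have hc : d.contains (pvJoinTokens p.2) = false :=
          (PySem.Dict.get?_eq_none_iff_contains ..).mp hd
        rw [PySem.Dict.setdefault_of_not_contains d _ hc]
        simp [PySem.Dict.get?_insert_self]
      · have hc : d.contains (pvJoinTokens p.2) = true := by
          by_contra hfalse
          have := (PySem.Dict.get?_eq_none_iff_contains ..).mpr (by simpa using hfalse)
          simp [this] at hd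
        rw [PySem.Dict.setdefault_of_contains d _ hc]
        simp [hd]
    · rw [PySem.Dict.get?_setdefault_of_ne d _ (fun he => h he.symm)]
      simp [h]

lemma loop_eq_foldr (ps : List (List (String × String))) (target : String) (i : Int) :
    get_sentence_index_loop ps target i
      = (PySem.List.enumerate ps i).foldr
          (fun p acc => if pvJoinTokens p.2 = target then some p.1 else acc) none := by
  induction ps generalizing i with
  | nil => simp [get_sentence_index_loop, PySem.List.enumerate_nil]
  | cons s ps ih =>
    rw [PySem.List.enumerate_cons]
    simp only [get_sentence_index_loop, List.foldr_cons, ih]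

-- ===== VERDICT (by name: the statement is the Claim_ definition above) =====
theorem get_sentence_index_spec : Claim_equal_get_sentence_index := by
  intro sentences target _
  show get_sentence_index sentences target = get_sentence_index_alt sentences target
  rw [get_sentence_index, get_sentence_index_alt, loop_eq_foldr, fold_setdefault_get?]
  simp
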